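-- pv_equiv track=rewrite | github.com/MavineRakiro/Sorting-Algorithms-Visualizer | sorting_algs.py | getCollorArray
-- ===== SOURCE A (Python) =====
-- def getCollorArray(dataLen, head, tail, border, curr_Index, is_swapping = False):
--     colorArray = []
--     for i in range(dataLen):
--         #base coloring
--         if i >= head and i <= tail:
--             colorArray.append('gray')
--         else:
--             colorArray.append('white')
--         if i == tail:
--             colorArray[i] = 'blue'
--         elif i == border:
--             colorArray[i] = 'red'
--         elif i == curr_Index:
--             colorArray[i] = 'yellow'
--
--         if is_swapping:
--             if i == border or i == curr_Index:
--                 colorArray[i] = 'green'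
--
--     return colorArray
-- ===== SOURCE B (Python) =====
-- def getCollorArray(dataLen, head, tail, border, curr_Index, is_swapping = False):
--     # fill-then-patch: base white list, gray segment, then point overrides in precedence order
--     colors = ['white'] * max(dataLen, 0)
--     for i in range(max(head, 0), min(tail, dataLen - 1) + 1):
--         colors[i] = 'gray'
--     for idx, c in ((curr_Index, 'yellow'), (border, 'red'), (tail, 'blue')):
--         if 0 <= idx < dataLen:
--             colors[idx] = c
--     if is_swapping:
--         for idx in (border, curr_Index):
--             if 0 <= idx < dataLen:
--                 colors[idx] = 'green'
--     return colors
-- ===== Notes on version B (the rewrite author's own statement) =====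
-- stated objective: simpler
-- what changed: Replaces the per-element branch cascade inside one loop by a fill-then-patch decomposition: build the white base list with list repetition, paint the gray segment with a bounded range, then apply the point overrides (yellow, red, blue, then green) in precedence order with bounds guards.
import Mathlib
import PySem

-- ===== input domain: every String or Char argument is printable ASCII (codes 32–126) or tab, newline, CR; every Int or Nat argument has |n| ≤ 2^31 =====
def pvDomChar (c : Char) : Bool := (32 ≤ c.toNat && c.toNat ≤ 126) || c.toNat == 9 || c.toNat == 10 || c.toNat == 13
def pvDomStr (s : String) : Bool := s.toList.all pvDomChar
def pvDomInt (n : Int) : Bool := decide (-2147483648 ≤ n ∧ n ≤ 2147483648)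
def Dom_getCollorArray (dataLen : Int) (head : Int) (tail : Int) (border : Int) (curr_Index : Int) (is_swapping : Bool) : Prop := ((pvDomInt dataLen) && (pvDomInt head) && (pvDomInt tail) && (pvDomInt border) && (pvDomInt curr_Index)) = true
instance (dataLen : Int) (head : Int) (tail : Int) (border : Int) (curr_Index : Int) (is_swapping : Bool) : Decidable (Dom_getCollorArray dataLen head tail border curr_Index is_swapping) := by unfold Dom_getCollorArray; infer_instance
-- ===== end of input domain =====

-- B replaces A's per-element branch cascade by a fill-then-patch decomposition (simpler); same output.

-- ===== PORT A =====
-- loop body of A; 'colorArray[i] = v' is ported as List.set i.toNat: inside the loop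
-- 0 ≤ i < len(colorArray) always holds, so this is exact.
def pvStepA (head : Int) (tail : Int) (border : Int) (curr_Index : Int) (is_swapping : Bool)
    (colorArray : List String) (i : Int) : List String :=
  let colorArray := colorArray ++ [if head ≤ i ∧ i ≤ tail then "gray" else "white"]
  let colorArray :=
    if i = tail then colorArray.set i.toNat "blue"
    else if i = border then colorArray.set i.toNat "red"
    else if i = curr_Index then colorArray.set i.toNat "yellow"
    else colorArray
  if is_swapping then
    (if i = border ∨ i = curr_Index then colorArray.set i.toNat "green" else colorArray)
  else colorArray

def getCollorArray (dataLen : Int) (head : Int) (tail : Int) (border : Int) (curr_Index : Int) (is_swapping : Bool) : List String :=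
  (PySem.List.pyRange 0 dataLen 1).foldl (pvStepA head tail border curr_Index is_swapping) []

-- ===== PORT B =====
-- guarded point write 'if 0 <= idx < dataLen: colors[idx] = c'
def pvSetIf (xs : List String) (idx : Int) (v : String) : List String :=
  if 0 ≤ idx ∧ idx < (xs.length : Int) then xs.set idx.toNat v else xs

def getCollorArray_alt (dataLen : Int) (head : Int) (tail : Int) (border : Int) (curr_Index : Int) (is_swapping : Bool) : List String :=
  let colors := List.replicate dataLen.toNat "white"  -- ['white'] * max(dataLen, 0)
  -- gray segment: indices of range(max(head,0), min(tail, dataLen-1)+1) are in bounds, so .set is exact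
  let colors := (PySem.List.pyRange (max head 0) (min tail (dataLen - 1) + 1) 1).foldl
                  (fun cs i => cs.set i.toNat "gray") colors
  let colors := pvSetIf colors curr_Index "yellow"
  let colors := pvSetIf colors border "red"
  let colors := pvSetIf colors tail "blue"
  if is_swapping then pvSetIf (pvSetIf colors border "green") curr_Index "green" else colors

-- ===== PRECONDITION & SPEC =====
def Spec_getCollorArray (dataLen : Int) (head : Int) (tail : Int) (border : Int) (curr_Index : Int) (is_swapping : Bool) (out : List String) : Prop := out = getCollorArray_alt dataLen head tail border curr_Index is_swapping
instance (dataLen : Int) (head : Int) (tail : Int) (border : Int) (curr_Index : Int) (is_swapping : Bool) (out : List String) : Decidable (Spec_getCollorArray dataLen head tail border curr_Index is_swapping out) := by unfold Spec_getCollorArray; infer_instance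

-- ===== CLAIM (what is proved, stated in full; the proofs are below) =====
def Claim_equal_getCollorArray : Prop := ∀ (dataLen : Int) (head : Int) (tail : Int) (border : Int) (curr_Index : Int) (is_swapping : Bool), Dom_getCollorArray dataLen head tail border curr_Index is_swapping → Spec_getCollorArray dataLen head tail border curr_Index is_swapping (getCollorArray dataLen head tail border curr_Index is_swapping)

-- ===== LEMMAS AND PROOFS =====

-- the color A and B assign to index i (proof-only specification function)
def pvColorAt (head tail border curr : Int) (sw : Bool) (i : Int) : String :=
  if sw ∧ (i = border ∨ i = curr) then "green"
  else if i = tail then "blue"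
  else if i = border then "red"
  else if i = curr then "yellow"
  else if head ≤ i ∧ i ≤ tail then "gray"
  else "white"

lemma stepA_snoc (h t b c : Int) (sw : Bool) (acc : List String) (i : Int)
    (hlen : acc.length = i.toNat) :
    pvStepA h t b c sw acc i = acc ++ [pvColorAt h t b c sw i] := by
  unfold pvStepA pvColorAt
  rw [← hlen]
  split_ifs <;> simp_all

lemma A_map (h t b c : Int) (sw : Bool) (k : Nat) :
    (PySem.List.pyRange 0 (k : Int) 1).foldl (pvStepA h t b c sw) [] =
      (List.range k).map (fun (j : Nat) => pvColorAt h t b c sw (j : Int)) := by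
  induction k with
  | zero => rw [PySem.List.pyRange_one_eq_nil (by omega)]; simp
  | succ k ih =>
      rw [show ((k + 1 : Nat) : Int) = (k : Int) + 1 by push_cast; ring,
        PySem.List.pyRange_one_succ_right (by omega), List.foldl_append]
      simp only [List.foldl_cons, List.foldl_nil, ih]
      rw [stepA_snoc h t b c sw _ (k : Int) (by simp)]
      simp [List.range_succ]

lemma A_eq (n h t b c : Int) (sw : Bool) :
    getCollorArray n h t b c sw =
      (List.range n.toNat).map (fun (j : Nat) => pvColorAt h t b c sw (j : Int)) := by
  unfold getCollorArray
  rcases (show n ≤ 0 ∨ 0 < n by omega) with hn | hn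
  · rw [PySem.List.pyRange_one_eq_nil hn, Int.toNat_of_nonpos hn]; simp
  · rw [show n = (n.toNat : Int) by omega]; exact A_map h t b c sw n.toNat

lemma foldl_set_length (l : List Int) (xs : List String) :
    (l.foldl (fun cs i => cs.set i.toNat "gray") xs).length = xs.length := by
  induction l generalizing xs with
  | nil => rfl
  | cons a l ih => simp [List.foldl_cons, ih]

lemma pvSetIf_length (xs : List String) (i : Int) (v : String) :
    (pvSetIf xs i v).length = xs.length := by
  unfold pvSetIf; split_ifs <;> simp

lemma getD_set_nat (xs : List String) (n j : Nat) (v : String) :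
    (xs.set n v).getD j "" = if n = j ∧ j < xs.length then v else xs.getD j "" := by
  simp only [List.getD, List.getElem?_set]
  split_ifs <;> simp_all

lemma grayFold_getD (a : Int) (ha : 0 ≤ a) (m : Nat) (xs : List String) (j : Nat)
    (hj : j < xs.length) :
    ((PySem.List.pyRange a (a + m) 1).foldl (fun cs i => cs.set i.toNat "gray") xs).getD j "" =
      if a ≤ (j : Int) ∧ (j : Int) < a + m then "gray" else xs.getD j "" := by
  induction m with
  | zero =>
      rw [PySem.List.pyRange_one_eq_nil (by omega)]
      simp only [List.foldl_nil]
      rw [if_neg (by push_cast; omega)]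
  | succ m ih =>
      rw [show (a + (m + 1 : Nat) : Int) = (a + m) + 1 by push_cast; ring,
        PySem.List.pyRange_one_succ_right (by omega), List.foldl_append]
      simp only [List.foldl_cons, List.foldl_nil]
      rw [getD_set_nat, foldl_set_length, ih]
      split_ifs <;> first | rfl | (exfalso; push_cast at *; omega)

lemma grayFold_getD' (a b : Int) (ha : 0 ≤ a) (xs : List String) (j : Nat)
    (hj : j < xs.length) :
    ((PySem.List.pyRange a b 1).foldl (fun cs i => cs.set i.toNat "gray") xs).getD j "" =
      if a ≤ (j : Int) ∧ (j : Int) < b then "gray" else xs.getD j "" := by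
  rcases (show b ≤ a ∨ a < b by omega) with hb | hb
  · rw [PySem.List.pyRange_one_eq_nil hb]
    simp only [List.foldl_nil]
    rw [if_neg (by omega)]
  · rw [show b = a + ((b - a).toNat : Nat) by omega]
    exact grayFold_getD a ha _ xs j hj

lemma setIf_getD (xs : List String) (i : Int) (v : String) (j : Nat) :
    (pvSetIf xs i v).getD j "" =
      if i = (j : Int) ∧ (j : Int) < (xs.length : Int) then v else xs.getD j "" := by
  unfold pvSetIf
  by_cases h1 : 0 ≤ i ∧ i < (xs.length : Int)
  · rw [if_pos h1, getD_set_nat]; split_ifs <;> first | rfl | (exfalso; omega)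
  · rw [if_neg h1]; split_ifs <;> first | rfl | (exfalso; omega)

lemma B_length (n h t b c : Int) (sw : Bool) :
    (getCollorArray_alt n h t b c sw).length = n.toNat := by
  unfold getCollorArray_alt
  split_ifs <;> simp [pvSetIf_length, foldl_set_length]

lemma B_getD (n h t b c : Int) (sw : Bool) (j : Nat) (hj : j < n.toNat) :
    (getCollorArray_alt n h t b c sw).getD j "" = pvColorAt h t b c sw (j : Int) := by
  have hrep : j < (List.replicate n.toNat "white").length := by simpa using hj
  have e1 : ((PySem.List.pyRange (max h 0) (min t (n - 1) + 1) 1).foldl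
      (fun cs i => cs.set i.toNat "gray") (List.replicate n.toNat "white")).getD j "" =
      if h ≤ (j : Int) ∧ (j : Int) ≤ t then "gray" else "white" := by
    rw [grayFold_getD' _ _ (by omega) _ _ hrep]
    have hw : (List.replicate n.toNat "white").getD j "" = "white" := by
      rw [List.getD_eq_getElem _ _ hrep]; simp
    rw [hw]
    split_ifs <;> first | rfl | (exfalso; omega)
  unfold getCollorArray_alt pvColorAt
  cases sw <;>
    simp only [Bool.false_eq_true, if_false, if_true, true_and, false_and,
      setIf_getD, pvSetIf_length, foldl_set_length, List.length_replicate, e1] <;>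
    split_ifs <;> first | rfl | (exfalso; omega)

-- ===== VERDICT (by name: the statement is the Claim_ definition above) =====
theorem getCollorArray_spec : Claim_equal_getCollorArray := by
  intro n h t b c sw _
  unfold Spec_getCollorArray
  apply List.ext_getElem
  · rw [B_length, A_eq]; simp
  · intro j hj1 hj2
    have hjn : j < n.toNat := by rw [B_length] at hj2; exact hj2
    rw [← List.getD_eq_getElem _ "" hj1, ← List.getD_eq_getElem _ "" hj2,
      B_getD n h t b c sw j hjn, A_eq n h t b c sw]
    have hj' : j < ((List.range n.toNat).map
        (fun (j : Nat) => pvColorAt h t b c sw (j : Int))).length := by simpa using hjn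
    rw [List.getD_eq_getElem _ "" hj', List.getElem_map, List.getElem_range]
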